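-- pv_equiv track=rewrite | github.com/HEEE23/programmers | 프로그래머스/1/155652. 둘만의 암호/둘만의 암호.py | solution
-- ===== SOURCE A (Python) =====
-- def solution(s, skip, index):
--     answer = ''
--
-- #     skip = list(skip)
-- #     for i in range(len(skip)):
-- #         skip[i] = ord(skip[i])
--
-- #     for st in s:
-- #         lst = []
-- #         for i in range(1,index+1):
-- #             lst.append(ord('a') + (ord(st) - ord('a') + i) % 26)
--
-- #         count = 0
-- #         for l in lst:
-- #             if l in skip:
-- #                 count += 1
-- #         answer += chr(ord('a') + (lst[index-1] - ord('a') + count) % 26)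
--
--     alphabet = ['a','b','c','d','e','f','g','h','i','j','k','l','m',
--                 'n','o','p','q','r','s','t','u','v','w','x','y','z']
--     skip = list(skip)
--
--     for sk in skip:
--         if sk in alphabet:
--             alphabet.remove(sk)
--
--     for st in s:
--         answer += alphabet[(alphabet.index(st) + index)%len(alphabet)]
--
--     return answer
-- ===== SOURCE B (Python) =====
-- ALPHA = 'abcdefghijklmnopqrstuvwxyz'
--
-- def solution(s, skip, index):
--     banned = {ch for ch in skip if 'a' <= ch <= 'z'}
--     m = sum(1 for ch in ALPHA if ch not in banned)
--     out = []
--     for ch in s: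
--         # rank of ch among the kept letters = kept letters strictly below ch
--         r = sum(1 for c in ALPHA if c < ch and c not in banned)
--         t = (r + index) % m
--         # pick the t-th kept letter by a counting scan over the full alphabet
--         for c in ALPHA:
--             if c not in banned:
--                 if t == 0:
--                     out.append(c)
--                     break
--                 t -= 1
--     return ''.join(out)
-- ===== Notes on version B (the rewrite author's own statement) =====
-- stated objective: alternative
-- what changed: B never builds or mutates the reduced alphabet list: it computes each character's rank by counting kept letters below it and selects the shifted letter with a counting scan over the fixed 26-letter alphabet against a set of skipped letters, instead of A's list.remove mutation plus .index and modular list lookup.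
import Mathlib
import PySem

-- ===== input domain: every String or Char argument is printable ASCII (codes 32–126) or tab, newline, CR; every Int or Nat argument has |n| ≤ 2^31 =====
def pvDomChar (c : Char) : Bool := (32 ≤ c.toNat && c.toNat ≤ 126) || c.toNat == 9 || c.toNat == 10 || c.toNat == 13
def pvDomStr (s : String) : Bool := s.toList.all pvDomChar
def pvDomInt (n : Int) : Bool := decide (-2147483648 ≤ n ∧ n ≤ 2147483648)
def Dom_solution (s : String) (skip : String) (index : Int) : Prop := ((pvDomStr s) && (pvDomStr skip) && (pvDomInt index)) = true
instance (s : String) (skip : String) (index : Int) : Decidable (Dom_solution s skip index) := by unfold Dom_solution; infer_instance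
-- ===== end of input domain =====

-- B avoids A's mutated reduced-alphabet list: it ranks each character by counting kept
-- letters below it and selects the shifted letter by a counting scan (objective: alternative).


-- the 26-letter alphabet literal both Pythons carry
def pvAlpha : List Char :=
  ['a','b','c','d','e','f','g','h','i','j','k','l','m',
   'n','o','p','q','r','s','t','u','v','w','x','y','z']

-- ===== PORT A =====
-- for sk in skip: if sk in alphabet: alphabet.remove(sk)
def pvReduceA (skipL : List Char) : List Char :=
  skipL.foldl (fun a sk => if sk ∈ a then (PySem.List.remove? a sk).getD a else a) pvAlpha

-- answer += alphabet[(alphabet.index(st) + index) % len(alphabet)]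
def pvStepA (alph : List Char) (index : Int) (ans : List Char) (st : Char) : List Char :=
  match PySem.List.index? alph st with
  | some i => ans ++ [PySem.List.pyGetD alph (PySem.Int.mod ((i : Int) + index) (alph.length : Int)) 'a']
  | none => ans   -- Python raises ValueError here; excluded by Pre_solution

def solution (s : String) (skip : String) (index : Int) : String :=
  String.ofList (s.toList.foldl (pvStepA (pvReduceA skip.toList) index) [])

-- ===== PORT B =====
-- banned = {ch for ch in skip if 'a' <= ch <= 'z'}
def pvBanned (skipL : List Char) : PySem.Set Char :=
  PySem.Set.ofList (skipL.filter (fun c => decide ('a' ≤ c) && decide (c ≤ 'z')))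

-- the inner 'for c in ALPHA: if c not in banned: if t == 0: break else t -= 1' scan
def pvPick (banned : PySem.Set Char) : List Char → Int → Option Char
  | [], _ => none
  | c :: rest, t =>
    if PySem.Set.contains banned c then pvPick banned rest t
    else if t = 0 then some c else pvPick banned rest (t - 1)

def pvStepB (banned : PySem.Set Char) (m : Int) (index : Int) (out : List Char) (ch : Char) : List Char :=
  let r : Int := (pvAlpha.countP (fun c => decide (c < ch) && !(PySem.Set.contains banned c)) : Int)
  match pvPick banned pvAlpha (PySem.Int.mod (r + index) m) with
  | some c => out ++ [c]
  | none => out   -- Python never reaches this when a kept letter exists (see Pre_solution)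

def solution_alt (s : String) (skip : String) (index : Int) : String :=
  let banned := pvBanned skip.toList
  String.ofList (s.toList.foldl
    (pvStepB banned ((pvAlpha.countP (fun c => !(PySem.Set.contains banned c)) : Int)) index) [])

-- ===== PRECONDITION & SPEC =====
-- Pre_ excludes exactly the inputs on which A raises ValueError: some character of s
-- is not a lowercase letter, or is one of the skipped letters.
def Pre_solution (s : String) (skip : String) (index : Int) : Prop :=
  (s.toList.all (fun c => pvAlpha.contains c && !(skip.toList.contains c))) = true
instance (s : String) (skip : String) (index : Int) : Decidable (Pre_solution s skip index) := by
  unfold Pre_solution; infer_instance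

def pvWitness_solution : String × String × Int := ("ace", "b", 5)

def Spec_solution (s : String) (skip : String) (index : Int) (out : String) : Prop := out = solution_alt s skip index
instance (s : String) (skip : String) (index : Int) (out : String) : Decidable (Spec_solution s skip index out) := by unfold Spec_solution; infer_instance

-- ===== CLAIM (what is proved, stated in full; the proofs are below) =====
def Claim_equal_solution : Prop := ∀ (s : String) (skip : String) (index : Int), Dom_solution s skip index → Pre_solution s skip index → Spec_solution s skip index (solution s skip index)

-- ===== LEMMAS AND PROOFS =====

-- B's kept-letter test, as a named predicate (proof-only shorthand)
def pvKeep (skipL : List Char) (c : Char) : Bool := !(PySem.Set.contains (pvBanned skipL) c)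

-- A's guarded remove-fold over the (Nodup) alphabet is a filter by non-membership in skip
theorem pvReduceA_eq_filter (skipL : List Char) :
    pvReduceA skipL = pvAlpha.filter (fun c => decide (c ∉ skipL)) := by
  have hstep : ∀ (a : List Char) (x : Char),
      (if x ∈ a then (PySem.List.remove? a x).getD a else a) = a.erase x := by
    intro a x
    by_cases h : x ∈ a
    · rw [PySem.List.remove?_eq_some_erase _ _ h]; simp [h]
    · simp [h, List.erase_of_not_mem h]
  have hfold : ∀ (sk a : List Char),
      sk.foldl (fun a sk => if sk ∈ a then (PySem.List.remove? a sk).getD a else a) a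
        = sk.foldl List.erase a := by
    intro sk
    induction sk with
    | nil => intro a; rfl
    | cons x t ih => intro a; rw [List.foldl_cons, List.foldl_cons, hstep, ih]
  have hnd : pvAlpha.Nodup := by decide
  rw [pvReduceA, hfold, ← List.diff_eq_foldl, hnd.diff_eq_filter]

-- B's banned-set test agrees with skip-membership on alphabet letters
theorem pvKeep_eq (skipL : List Char) (c : Char) (hc : c ∈ pvAlpha) :
    pvKeep skipL c = decide (c ∉ skipL) := by
  have hlow : 'a' ≤ c ∧ c ≤ 'z' := by fin_cases hc <;> exact ⟨by decide, by decide⟩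
  have hmem : c ∈ pvBanned skipL ↔ c ∈ skipL := by
    rw [pvBanned, PySem.Set.mem_ofList, List.mem_filter]
    simp [hlow.1, hlow.2]
  by_cases h : c ∈ skipL
  · simp only [pvKeep]
    simp [h]
    exact hmem.2 h
  · simp only [pvKeep]
    simp [h]
    exact fun hx => h (hmem.1 hx)

-- rank: index of c in the filtered list = number of kept letters strictly below c
theorem pvIndex_filter (p : Char → Bool) (l : List Char) (hl : l.Pairwise (· < ·))
    (c : Char) (hc : c ∈ l) (hp : p c = true) :
    PySem.List.index? (l.filter p) c = some (l.countP (fun x => decide (x < c) && p x)) := by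
  induction l with
  | nil => cases hc
  | cons a rest ih =>
    have hpa : ∀ x ∈ rest, a < x := fun x hx => (List.pairwise_cons.1 hl).1 x hx
    have hrest : rest.Pairwise (· < ·) := (List.pairwise_cons.1 hl).2
    by_cases hpaq : p a = true
    · rw [List.filter_cons_of_pos hpaq]
      by_cases hac : a = c
      · subst hac
        rw [PySem.List.index?_cons_self]
        have hcount : rest.countP (fun x => decide (x < a) && p x) = 0 := by
          rw [List.countP_eq_zero]
          intro x hx
          simp [not_lt.2 (le_of_lt (hpa x hx))]
        simp [hcount]
      · have hcr : c ∈ rest := by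
          rcases List.mem_cons.1 hc with h | h
          · exact absurd h.symm hac
          · exact h
        rw [PySem.List.index?_cons_of_ne _ hac, ih hrest hcr]
        have : a < c := hpa c hcr
        simp [hpaq, this, Nat.add_comm]
    · have hac : a ≠ c := fun h => hpaq (h ▸ hp)
      have hcr : c ∈ rest := by
        rcases List.mem_cons.1 hc with h | h
        · exact absurd h.symm hac
        · exact h
      rw [List.filter_cons_of_neg (by simp [hpaq]), ih hrest hcr]
      simp [hpaq]

-- the counting scan picks the t-th kept letter of l
theorem pvPick_eq (banned : PySem.Set Char) (l : List Char) (t : Int) (ht : 0 ≤ t) :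
    pvPick banned l t = (l.filter (fun c => !(PySem.Set.contains banned c)))[t.toNat]? := by
  induction l generalizing t with
  | nil => simp [pvPick]
  | cons a rest ih =>
    by_cases hb : PySem.Set.contains banned a = true
    · rw [pvPick, if_pos hb,
          List.filter_cons_of_neg (by simp; exact (PySem.Set.contains_iff _ _).1 hb)]
      exact ih t ht
    · rw [pvPick, if_neg hb,
          List.filter_cons_of_pos (by simp; exact fun h => hb ((PySem.Set.contains_iff _ _).2 h))]
      by_cases h0 : t = 0
      · subst h0; simp
      · have h1 : 1 ≤ t := lt_of_le_of_ne ht (Ne.symm h0)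
        rw [if_neg h0, ih (t-1) (by omega)]
        have : t.toNat = (t-1).toNat + 1 := by omega
        rw [this, List.getElem?_cons_succ]

-- per-character agreement of the two loop bodies on an admitted character
theorem pvStep_eq (skipL : List Char) (index : Int) (acc : List Char) (c : Char)
    (hc : c ∈ pvAlpha) (hns : c ∉ skipL) :
    pvStepA (pvReduceA skipL) index acc c
      = pvStepB (pvBanned skipL) ((pvAlpha.countP (fun x => !(PySem.Set.contains (pvBanned skipL) x)) : Int)) index acc c := by
  have hkeep : ∀ x ∈ pvAlpha, decide (x ∉ skipL) = !(PySem.Set.contains (pvBanned skipL) x) :=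
    fun x hx => (pvKeep_eq skipL x hx).symm
  have hLA : pvReduceA skipL = pvAlpha.filter (fun x => !(PySem.Set.contains (pvBanned skipL) x)) := by
    rw [pvReduceA_eq_filter, List.filter_congr hkeep]
  have hkc : (!(PySem.Set.contains (pvBanned skipL) c)) = true := by
    rw [show (!(PySem.Set.contains (pvBanned skipL) c)) = pvKeep skipL c from rfl,
        pvKeep_eq skipL c hc]; simp [hns]
  have hcL : c ∈ pvAlpha.filter (fun x => !(PySem.Set.contains (pvBanned skipL) x)) :=
    List.mem_filter.2 ⟨hc, hkc⟩
  have hlen : 0 < (pvAlpha.filter (fun x => !(PySem.Set.contains (pvBanned skipL) x))).length :=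
    List.length_pos_of_mem hcL
  have hm : (pvAlpha.countP (fun x => !(PySem.Set.contains (pvBanned skipL) x)) : Int)
      = ((pvAlpha.filter (fun x => !(PySem.Set.contains (pvBanned skipL) x))).length : Int) := by
    rw [List.countP_eq_length_filter]
  have hidx : PySem.List.index? (pvAlpha.filter (fun x => !(PySem.Set.contains (pvBanned skipL) x))) c
      = some (pvAlpha.countP (fun x => decide (x < c) && !(PySem.Set.contains (pvBanned skipL) x))) :=
    pvIndex_filter _ pvAlpha (by decide) c hc hkc
  have h0 : 0 ≤ PySem.Int.mod ((pvAlpha.countP (fun x => decide (x < c) && !(PySem.Set.contains (pvBanned skipL) x)) : Int) + index)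
      ((pvAlpha.filter (fun x => !(PySem.Set.contains (pvBanned skipL) x))).length : Int) :=
    PySem.Int.mod_nonneg _ (by exact_mod_cast hlen)
  have hj : PySem.Int.mod ((pvAlpha.countP (fun x => decide (x < c) && !(PySem.Set.contains (pvBanned skipL) x)) : Int) + index)
      ((pvAlpha.filter (fun x => !(PySem.Set.contains (pvBanned skipL) x))).length : Int)
      < ((pvAlpha.filter (fun x => !(PySem.Set.contains (pvBanned skipL) x))).length : Int) :=
    PySem.Int.mod_lt _ (by exact_mod_cast hlen)
  have hjn : (PySem.Int.mod ((pvAlpha.countP (fun x => decide (x < c) && !(PySem.Set.contains (pvBanned skipL) x)) : Int) + index)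
      ((pvAlpha.filter (fun x => !(PySem.Set.contains (pvBanned skipL) x))).length : Int)).toNat
      < (pvAlpha.filter (fun x => !(PySem.Set.contains (pvBanned skipL) x))).length := by
    omega
  rw [pvStepA, pvStepB, hLA]
  simp only [hidx, hm]
  rw [pvPick_eq _ _ _ h0, List.getElem?_eq_getElem hjn,
      PySem.List.pyGetD_eq_getElem _ 'a' h0 hj]

-- ===== VERDICT (by name: the statement is the Claim_ definition above) =====
theorem solution_spec : Claim_equal_solution := by
  intro s skip index _ hpre
  have hall : ∀ c ∈ s.toList, c ∈ pvAlpha ∧ c ∉ skip.toList := by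
    intro c hcs
    have := (List.all_eq_true.1 hpre) c hcs
    simp only [Bool.and_eq_true, Bool.not_eq_true', List.contains_eq_mem, decide_eq_true_eq,
      decide_eq_false_iff_not] at this
    exact this
  unfold Spec_solution solution solution_alt
  congr 1
  have h : ∀ (cs : List Char) (acc : List Char), (∀ c ∈ cs, c ∈ pvAlpha ∧ c ∉ skip.toList) →
      cs.foldl (pvStepA (pvReduceA skip.toList) index) acc
        = cs.foldl (pvStepB (pvBanned skip.toList) ((pvAlpha.countP (fun x => !(PySem.Set.contains (pvBanned skip.toList) x)) : Int)) index) acc := by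
    intro cs
    induction cs with
    | nil => intro acc _; rfl
    | cons c t ih =>
      intro acc hall
      rw [List.foldl_cons, List.foldl_cons,
          pvStep_eq skip.toList index acc c (hall c (List.mem_cons_self)).1 (hall c (List.mem_cons_self)).2,
          ih _ (fun x hx => hall x (List.mem_cons_of_mem _ hx))]
  exact h s.toList [] hall
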